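-- pv_equiv track=rewrite | github.com/LudvigOlsen/nattrs | nattrs/nested_attributes.py | _replace_dots_in_regex
-- ===== SOURCE A (Python) =====
-- DOT_PLACEHOLDER = "[[DOT]]"  # Placeholder for dots inside regex terms
--
-- def _replace_dots_in_regex(attr: str) -> str:
--     """Replace dots inside regex terms (inside `{}`) with a placeholder."""
--     result = []
--     inside_regex = False
--
--     for char in attr:
--         if char == "{":
--             inside_regex = True
--         elif char == "}":
--             inside_regex = False
--         if char == "." and inside_regex:
--             result.append(DOT_PLACEHOLDER)
--         else:
--             result.append(char)
--
--     return "".join(result)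
-- ===== SOURCE B (Python) =====
-- DOT_PLACEHOLDER = "[[DOT]]"  # Placeholder for dots inside regex terms
--
--
-- def _fix_region(inner: str) -> str:
--     return "".join(DOT_PLACEHOLDER if ch == "." else ch for ch in inner)
--
--
-- def _replace_dots_in_regex(attr: str) -> str:
--     """Replace dots inside regex terms (inside `{}`) with a placeholder."""
--     out = []
--     rest = attr
--     while rest:
--         outside, brace, rest = rest.partition("{")
--         out.append(outside + brace)
--         if brace:
--             inner, close, rest = rest.partition("}")
--             out.append(_fix_region(inner) + close)
--     return "".join(out)
-- ===== Notes on version B (the rewrite author's own statement) =====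
-- stated objective: faster
-- what changed: Replaces the per-character state-flag loop with region-based scanning: repeatedly str.partition on the opening and closing braces to isolate each inside-braces span and rewrite dots only there, so most characters are handled by C-level str.partition/join instead of a Python-level loop iteration.
import Mathlib
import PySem

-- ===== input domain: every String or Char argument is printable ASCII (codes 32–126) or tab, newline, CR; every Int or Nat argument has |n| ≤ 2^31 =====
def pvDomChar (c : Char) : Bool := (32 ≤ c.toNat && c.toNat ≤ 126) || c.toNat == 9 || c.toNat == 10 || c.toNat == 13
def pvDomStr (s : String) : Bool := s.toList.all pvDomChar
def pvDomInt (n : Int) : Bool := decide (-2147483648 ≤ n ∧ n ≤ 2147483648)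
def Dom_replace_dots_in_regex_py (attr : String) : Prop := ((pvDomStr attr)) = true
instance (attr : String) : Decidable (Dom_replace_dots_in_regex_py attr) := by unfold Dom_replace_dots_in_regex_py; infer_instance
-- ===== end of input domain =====

-- B replaces A's per-character inside-braces flag loop by region scanning (partition on '{'/'}' and a
-- localized dot rewrite per region); measured faster by a constant factor (bulk str operations).


def DOT_PLACEHOLDER : String := "[[DOT]]"

-- ===== PORT A =====
-- for char in attr: update the inside flag, append DOT_PLACEHOLDER or the char; "".join at the end
def replace_dots_in_regex_py (attr : String) : String :=
  let step : List (List Char) × Bool → Char → List (List Char) × Bool := fun st char =>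
    let inside := if char = '{' then true else if char = '}' then false else st.2
    if char = '.' && inside then (st.1 ++ [DOT_PLACEHOLDER.toList], inside)
    else (st.1 ++ [[char]], inside)
  String.mk (PySem.Chars.join [] (attr.toList.foldl step ([], false)).1)

-- ===== PORT B =====
-- hand port of str.partition(sep) for a single-character sep: exact — splits at the FIRST
-- occurrence of c, returning (before, sep-or-empty, after); ('s','','') shape when c is absent.
def partAt (c : Char) : List Char → List Char × List Char × List Char
  | [] => ([], [], [])
  | x :: xs =>
    if x = c then ([], [c], xs)
    else
      let r := partAt c xs
      (x :: r.1, r.2.1, r.2.2)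

lemma partAt_rest_le (c : Char) (s : List Char) : (partAt c s).2.2.length ≤ s.length := by
  induction s with
  | nil => simp [partAt]
  | cons x xs ih =>
    by_cases hx : x = c
    · simp [partAt, hx]
    · simp only [partAt, if_neg hx, List.length_cons]
      omega

lemma partAt_rest_lt (c : Char) (s : List Char) (h : (partAt c s).2.1 ≠ []) :
    (partAt c s).2.2.length < s.length := by
  induction s with
  | nil => simp [partAt] at h
  | cons x xs ih =>
    by_cases hx : x = c
    · simp [partAt, hx]
    · simp only [partAt, if_neg hx, List.length_cons] at h ⊢
      exact Nat.lt_succ_of_lt (ih h)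

def fixRegion (inner : List Char) : List Char :=
  PySem.Chars.join [] (inner.map (fun ch => if ch = '.' then DOT_PLACEHOLDER.toList else [ch]))

-- while rest: partition off the text up to '{', then (if a brace was found) the region up to '}'
def bLoop (rest : List Char) : List (List Char) :=
  if rest = [] then []
  else
    let p1 := partAt '{' rest
    if hb : p1.2.1 ≠ [] then
      let p2 := partAt '}' p1.2.2
      (p1.1 ++ p1.2.1) :: (fixRegion p2.1 ++ p2.2.1) :: bLoop p2.2.2
    else [p1.1 ++ p1.2.1]
termination_by rest.length
decreasing_by
  exact Nat.lt_of_le_of_lt (partAt_rest_le '}' _) (partAt_rest_lt '{' rest hb)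

def replace_dots_in_regex_py_alt (attr : String) : String :=
  String.mk (PySem.Chars.join [] (bLoop attr.toList))

-- ===== PRECONDITION & SPEC =====
def Spec_replace_dots_in_regex_py (attr : String) (out : String) : Prop := out = replace_dots_in_regex_py_alt attr
instance (attr : String) (out : String) : Decidable (Spec_replace_dots_in_regex_py attr out) := by unfold Spec_replace_dots_in_regex_py; infer_instance

-- ===== CLAIM (what is proved, stated in full; the proofs are below) =====
def Claim_equal_replace_dots_in_regex_py : Prop := ∀ (attr : String), Dom_replace_dots_in_regex_py attr → Spec_replace_dots_in_regex_py attr (replace_dots_in_regex_py attr)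

-- ===== LEMMAS AND PROOFS =====

-- reference function: output of the rest of the input given the current inside flag
def F (ins : Bool) : List Char → List Char
  | [] => []
  | c :: t =>
    let ins' := if c = '{' then true else if c = '}' then false else ins
    (if c = '.' && ins' then DOT_PLACEHOLDER.toList else [c]) ++ F ins' t

lemma F_cons (ins : Bool) (c : Char) (t : List Char) :
    F ins (c :: t) =
      (if c = '.' && (if c = '{' then true else if c = '}' then false else ins)
        then DOT_PLACEHOLDER.toList else [c]) ++
      F (if c = '{' then true else if c = '}' then false else ins) t := rfl

lemma join_nil_eq_flatten (l : List (List Char)) : PySem.Chars.join [] l = l.flatten := by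
  induction l with
  | nil => rfl
  | cons a t ih =>
    cases t with
    | nil => simp [PySem.Chars.join, List.intercalate]
    | cons b u =>
      simp only [PySem.Chars.join, List.intercalate, List.intersperse] at ih ⊢
      simp_all

-- A's fold computes F
lemma foldA (cs : List Char) : ∀ (acc : List (List Char)) (ins : Bool),
    (cs.foldl (fun st char =>
      let inside := if char = '{' then true else if char = '}' then false else st.2
      if char = '.' && inside then (st.1 ++ [DOT_PLACEHOLDER.toList], inside)
      else (st.1 ++ [[char]], inside)) (acc, ins)).1.flatten = acc.flatten ++ F ins cs := by
  induction cs with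
  | nil => intro acc ins; simp [F]
  | cons c t ih =>
    intro acc ins
    rw [List.foldl_cons, F_cons]
    by_cases hd : (c = '.' && (if c = '{' then true else if c = '}' then false else ins)) = true
    · simp only [hd, if_true, ih]
      simp
    · simp only [Bool.not_eq_true] at hd
      simp only [hd, if_false, ih]
      simp

lemma F_true_part (s : List Char) :
    F true s = fixRegion (partAt '}' s).1 ++ (partAt '}' s).2.1 ++ F false (partAt '}' s).2.2 := by
  induction s with
  | nil => simp [F, partAt, fixRegion, join_nil_eq_flatten]
  | cons c t ih =>
    by_cases hc : c = '}'
    · subst hc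
      rw [F_cons]
      simp [partAt, fixRegion, join_nil_eq_flatten]
    · rw [F_cons]
      have hin : (if c = '{' then true else if c = '}' then false else true) = true := by
        simp [hc]
      rw [hin]
      simp only [partAt, if_neg hc]
      rw [ih]
      simp only [fixRegion, join_nil_eq_flatten, List.map_cons, List.flatten_cons]
      by_cases hdot : c = '.'
      · simp [hdot]
      · simp [hdot, hc]

lemma F_false_part (s : List Char) :
    F false s = (partAt '{' s).1 ++ (partAt '{' s).2.1 ++ F true (partAt '{' s).2.2 := by
  induction s with
  | nil => simp [F, partAt]
  | cons c t ih =>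
    by_cases hc : c = '{'
    · subst hc
      rw [F_cons]
      simp [partAt]
    · have hin : (if c = '{' then true else if c = '}' then false else false) = false := by
        by_cases h2 : c = '}' <;> simp [hc, h2]
      have hstep : F false (c :: t) = [c] ++ F false t := by
        rw [F_cons, hin]; simp
      rw [hstep]
      simp only [partAt, if_neg hc]
      rw [ih]
      simp

lemma partAt_not_found (c : Char) (s : List Char) (h : (partAt c s).2.1 = []) :
    (partAt c s).1 = s ∧ (partAt c s).2.2 = [] := by
  induction s with
  | nil => simp [partAt]
  | cons x xs ih =>
    by_cases hx : x = c
    · simp [partAt, hx] at h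
    · simp only [partAt, if_neg hx] at h ⊢
      exact ⟨by simp [(ih h).1], (ih h).2⟩

lemma bLoop_eq_F (s : List Char) : (bLoop s).flatten = F false s := by
  induction s using bLoop.induct with
  | case1 => simp [bLoop, F]
  | case2 rest hne p1 hb p2 ih =>
    have hp1 : p1 = partAt '{' rest := rfl
    have hp2 : p2 = partAt '}' p1.2.2 := rfl
    rw [bLoop, if_neg hne, dif_pos hb]
    simp only [List.flatten_cons]
    rw [show partAt '}' (partAt '{' rest).2.2 = p2 from by rw [hp2, hp1],
        show partAt '{' rest = p1 from hp1.symm, ih,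
        F_false_part rest, ← hp1, F_true_part p1.2.2, ← hp2]
  | case3 rest hne p1 hb =>
    have hp1 : p1 = partAt '{' rest := rfl
    rw [bLoop, if_neg hne, dif_neg hb]
    simp only [not_not] at hb
    rw [F_false_part rest, ← hp1]
    obtain ⟨h1, h2⟩ := partAt_not_found '{' rest (hp1 ▸ hb)
    rw [← hp1] at h1 h2
    simp [hb, h2, F]

-- ===== VERDICT (by name: the statement is the Claim_ definition above) =====
theorem replace_dots_in_regex_py_spec : Claim_equal_replace_dots_in_regex_py := by
  intro attr _
  unfold Spec_replace_dots_in_regex_py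
  have h : PySem.Chars.join [] ((attr.toList.foldl (fun st char =>
      let inside := if char = '{' then true else if char = '}' then false else st.2
      if char = '.' && inside then (st.1 ++ [DOT_PLACEHOLDER.toList], inside)
      else (st.1 ++ [[char]], inside)) ([], false)).1) = PySem.Chars.join [] (bLoop attr.toList) := by
    rw [join_nil_eq_flatten, join_nil_eq_flatten, bLoop_eq_F]
    simpa using foldA attr.toList [] false
  exact congrArg String.mk h
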